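-- pv_equiv track=rewrite | github.com/olivkoch/adventofcode | 2023/s18.py | find_interior_point
-- ===== SOURCE A (Python) =====
-- def find_interior_point(mp):
--     for r,line in enumerate(mp):
--         x = 0
--         for c,u in enumerate(line):
--             if u == '#':
--                 x = 1
--             if u == '.' and x == 1:
--                 if '#' in line[c+1:]:
--                     return (r,c)
--     return None
-- ===== SOURCE B (Python) =====
-- def find_interior_point(mp):
--     for r, line in enumerate(mp):
--         hashes = [i for i in range(len(line)) if line[i] == '#']
--         if len(hashes) < 2:
--             continue
--         lo, hi = hashes[0], hashes[-1]
--         for c in range(lo + 1, hi):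
--             if line[c] == '.':
--                 return (r, c)
--     return None
-- ===== Notes on version B (the rewrite author's own statement) =====
-- stated objective: alternative
-- what changed: Per row, instead of a single flag-scan that re-slices the line at every '.' to test for a later '#', B stages the work: it first builds the list of all '#' indices, then scans only the segment strictly between the first and last '#' for the first '.', so no suffix is ever re-scanned; it trades A's C-level suffix slicing for explicit index passes.
import Mathlib
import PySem

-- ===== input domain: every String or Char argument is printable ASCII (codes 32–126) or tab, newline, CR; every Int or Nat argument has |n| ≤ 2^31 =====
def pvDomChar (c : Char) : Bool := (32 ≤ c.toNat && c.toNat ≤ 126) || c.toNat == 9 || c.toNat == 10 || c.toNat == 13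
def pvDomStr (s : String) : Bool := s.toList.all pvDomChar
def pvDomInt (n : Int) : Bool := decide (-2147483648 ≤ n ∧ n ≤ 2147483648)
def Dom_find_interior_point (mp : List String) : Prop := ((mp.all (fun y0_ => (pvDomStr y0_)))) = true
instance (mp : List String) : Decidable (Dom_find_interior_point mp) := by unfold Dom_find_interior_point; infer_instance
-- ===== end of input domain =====

-- B replaces A's flag-scan with re-slicing at every '.' by staged passes per row: first collect the
-- list of '#' indices, then scan only the segment strictly between the first and last '#' for a '.'
-- (objective: alternative algorithm; not measured faster).

-- ===== PORT A =====
-- inner loop of A: state x (the 0/1 flag, as Bool), counter c; `line[c+1:]` is the slice, `'#' in …` is isIn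
def pvA_row (line : List Char) : List Char → Nat → Bool → Option Nat
  | [], _, _ => none
  | u :: rest, c, x =>
    let x' := if u == '#' then true else x
    if u == '.' && x' then
      if PySem.Chars.isIn ['#'] (PySem.List.slice line (some ((c : Int) + 1)) none) then some c
      else pvA_row line rest (c + 1) x'
    else pvA_row line rest (c + 1) x'

-- outer loop of A over the rows, r the enumerate counter
def pvA_rows : Int → List String → Option (Int × Int)
  | _, [] => none
  | r, line :: rest =>
    match pvA_row line.toList line.toList 0 false with
    | some c => some (r, (c : Int))
    | none => pvA_rows (r + 1) rest

def find_interior_point (mp : List String) : Option (Int × Int) := pvA_rows 0 mp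

-- ===== PORT B =====
-- B's body for one row: hashes = [i for i in range(len(line)) if line[i] == '#'];
-- if len(hashes) < 2: continue; lo, hi = hashes[0], hashes[-1];
-- for c in range(lo+1, hi): if line[c] == '.': return c
def pvB_row (line : String) : Option Nat :=
  let cs := line.toList
  let hashes := (List.range cs.length).filter (fun i => cs[i]? == some '#')
  if hashes.length < 2 then none
  else
    let lo := hashes.headD 0
    let hi := hashes.getLastD 0
    (List.range' (lo + 1) (hi - (lo + 1))).find? (fun c => cs[c]? == some '.')

-- B's loop over the rows
def pvB_rows : Int → List String → Option (Int × Int)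
  | _, [] => none
  | r, line :: rest =>
    match pvB_row line with
    | some c => some (r, (c : Int))
    | none => pvB_rows (r + 1) rest

def find_interior_point_alt (mp : List String) : Option (Int × Int) := pvB_rows 0 mp

-- ===== PRECONDITION & SPEC =====
def Spec_find_interior_point (mp : List String) (out : Option (Int × Int)) : Prop := out = find_interior_point_alt mp
instance (mp : List String) (out : Option (Int × Int)) : Decidable (Spec_find_interior_point mp out) := by unfold Spec_find_interior_point; infer_instance

-- ===== CLAIM (what is proved, stated in full; the proofs are below) =====
def Claim_equal_find_interior_point : Prop := ∀ (mp : List String), Dom_find_interior_point mp → Spec_find_interior_point mp (find_interior_point mp)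

-- ===== LEMMAS AND PROOFS =====

-- reference description of one row: the first index k holding '.' with a '#' before it and a '#' after it
def pvGood (cs : List Char) (k : Nat) : Bool :=
  (cs[k]? == some '.') && (cs.take k).any (· == '#') && (cs.drop (k + 1)).any (· == '#')

def pvRef (cs : List Char) : Option Nat := (List.range cs.length).find? (pvGood cs)

lemma pv_any_take_iff (cs : List Char) (a : Char) (c : Nat) :
    (cs.take c).any (· == a) = true ↔ ∃ i < c, cs[i]? = some a := by
  simp only [List.any_eq_true, beq_iff_eq]
  constructor
  · rintro ⟨x, hx, rfl⟩
    obtain ⟨i, hi⟩ := List.mem_iff_getElem?.mp hx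
    refine ⟨i, ?_, ?_⟩ <;> [skip; skip]
    · by_contra hic
      have : (cs.take c)[i]? = none := by
        apply List.getElem?_eq_none
        simp; omega
      simp [this] at hi
    · rw [← hi]
      rw [List.getElem?_take]
      split
      · rfl
      · exfalso
        have : (cs.take c)[i]? = none := by
          apply List.getElem?_eq_none
          simp; omega
        simp [this] at hi
  · rintro ⟨i, hic, hi⟩
    refine ⟨a, ?_, rfl⟩
    apply List.mem_of_getElem? (i := i)
    rw [List.getElem?_take, if_pos hic]
    exact hi

lemma pv_any_drop_iff (cs : List Char) (a : Char) (m : Nat) :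
    (cs.drop m).any (· == a) = true ↔ ∃ j, m ≤ j ∧ cs[j]? = some a := by
  simp only [List.any_eq_true, beq_iff_eq]
  constructor
  · rintro ⟨x, hx, rfl⟩
    obtain ⟨i, hi⟩ := List.mem_iff_getElem?.mp hx
    rw [List.getElem?_drop] at hi
    exact ⟨m + i, by omega, hi⟩
  · rintro ⟨j, hmj, hj⟩
    refine ⟨a, ?_, rfl⟩
    apply List.mem_of_getElem? (i := j - m)
    rw [List.getElem?_drop]
    rw [← hj]
    congr 1
    omega

lemma pv_good_iff (cs : List Char) (k : Nat) :
    pvGood cs k = true ↔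
      cs[k]? = some '.' ∧ (∃ i < k, cs[i]? = some '#') ∧ (∃ j, k + 1 ≤ j ∧ cs[j]? = some '#') := by
  unfold pvGood
  simp only [Bool.and_eq_true, beq_iff_eq, pv_any_take_iff, pv_any_drop_iff]
  tauto

lemma pv_isIn_singleton_eq_any (a : Char) (l : List Char) :
    PySem.Chars.isIn [a] l = l.any (· == a) := by
  rw [Bool.eq_iff_iff]
  simp [PySem.Chars.isIn_iff_infix, List.singleton_infix_iff, List.any_eq_true]

lemma pv_find?_range'_none (p : Nat → Bool) (s n : Nat) (h : ∀ k, s ≤ k → k < s + n → p k = false) :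
    (List.range' s n).find? p = none := by
  rw [List.find?_eq_none]
  intro x hx
  rw [List.mem_range'_1] at hx
  simp [h x hx.1 hx.2]

lemma pv_find?_congr (p q : Nat → Bool) (l : List Nat) (h : ∀ x ∈ l, p x = q x) :
    l.find? p = l.find? q := by
  induction l with
  | nil => rfl
  | cons a t ih =>
    have ha := h a (List.mem_cons_self ..)
    by_cases hp : p a = true
    · rw [List.find?_cons_of_pos hp, List.find?_cons_of_pos (ha ▸ hp)]
    · rw [List.find?_cons_of_neg hp, List.find?_cons_of_neg (ha ▸ hp)]
      exact ih (fun x hx => h x (List.mem_cons_of_mem _ hx))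

lemma pv_le_getLastD (l : List Nat) (h : l.Pairwise (· < ·)) : ∀ x ∈ l, x ≤ l.getLastD 0 := by
  induction l with
  | nil => intro x hx; simp at hx
  | cons a t ih =>
    intro x hx
    rw [List.pairwise_cons] at h
    cases t with
    | nil => simp at hx; simp [hx]
    | cons b t' =>
      have hlast : (a :: b :: t').getLastD 0 = (b :: t').getLastD 0 := rfl
      rw [hlast]
      rcases List.mem_cons.mp hx with rfl | hx'
      · have hb : x < b := h.1 b (List.mem_cons_self ..)
        have := ih h.2 b (List.mem_cons_self ..)
        omega
      · exact ih h.2 x hx'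

lemma pv_getLastD_mem (l : List Nat) (h : l ≠ []) : l.getLastD 0 ∈ l := by
  induction l with
  | nil => exact absurd rfl h
  | cons a t ih =>
    cases t with
    | nil => simp
    | cons b t' => exact List.mem_cons_of_mem _ (ih (by simp))

-- the A-side invariant: the inner loop computes the first good index from position c on
lemma pvA_row_spec (cs : List Char) : ∀ (rest : List Char) (c : Nat) (x : Bool),
    rest = cs.drop c → x = (cs.take c).any (· == '#') →
    pvA_row cs rest c x = (List.range' c (cs.length - c)).find? (pvGood cs) := by
  intro rest
  induction rest with
  | nil =>
    intro c x h hx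
    have hlen : cs.length ≤ c := List.drop_eq_nil_iff.mp h.symm
    have h0 : cs.length - c = 0 := by omega
    rw [h0, List.range'_zero]
    rfl
  | cons u tail ih =>
    intro c x h hx
    have hgc : cs[c]? = some u := by rw [← List.head?_drop, ← h]; rfl
    obtain ⟨hclen, hu⟩ := List.getElem?_eq_some_iff.mp hgc
    have htail : tail = cs.drop (c + 1) := by rw [← List.tail_drop, ← h, List.tail_cons]
    have hx' : (if u == '#' then true else x) = (cs.take (c + 1)).any (· == '#') := by
      rw [List.take_succ_eq_append_getElem hclen, List.any_append, hu, ← hx]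
      cases hu' : (u == '#') <;> cases x <;> simp [hu']
    have hslice : PySem.List.slice cs (some ((c : Int) + 1)) none = cs.drop (c + 1) := by
      have h2 : ((c : Int) + 1) = ((c + 1 : Nat) : Int) := by push_cast; ring
      rw [h2, PySem.List.slice_from_natCast]
    have hlen1 : cs.length - c = (cs.length - (c + 1)) + 1 := by omega
    rw [hlen1, List.range'_succ]
    by_cases hcond : (u == '.' && (if u == '#' then true else x)) = true
    · simp only [Bool.and_eq_true, beq_iff_eq] at hcond
      obtain ⟨hu', hxx⟩ := hcond
      rw [hu'] at hxx
      simp at hxx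
      by_cases hin : PySem.Chars.isIn ['#'] (PySem.List.slice cs (some ((c : Int) + 1)) none) = true
      · have hgood : pvGood cs c = true := by
          rw [pv_good_iff]
          refine ⟨by rw [hgc, hu'], ?_, ?_⟩
          · exact (pv_any_take_iff cs '#' c).mp (by rw [← hx]; exact hxx)
          · rw [hslice, pv_isIn_singleton_eq_any] at hin
            exact (pv_any_drop_iff cs '#' (c + 1)).mp hin
        simp only [pvA_row]
        rw [if_pos (by simp [hu', hxx]), if_pos hin, List.find?_cons_of_pos hgood]
      · have hgood : pvGood cs c = false := by
          apply Bool.eq_false_iff.mpr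
          intro hgd
          rw [pv_good_iff] at hgd
          obtain ⟨-, -, hj⟩ := hgd
          apply hin
          rw [hslice, pv_isIn_singleton_eq_any]
          exact (pv_any_drop_iff cs '#' (c + 1)).mpr hj
        simp only [pvA_row]
        rw [if_pos (by simp [hu', hxx]), if_neg hin, List.find?_cons_of_neg (by simp [hgood])]
        exact ih (c + 1) _ htail hx'
    · have hgood : pvGood cs c = false := by
        apply Bool.eq_false_iff.mpr
        intro hgd
        rw [pv_good_iff] at hgd
        obtain ⟨hdot, hi, -⟩ := hgd
        have hu' : u = '.' := by rw [hgc] at hdot; exact (Option.some_inj.mp hdot)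
        have hxt : x = true := by
          rw [hx]
          exact (pv_any_take_iff cs '#' c).mpr hi
        apply hcond
        simp [hu', hxt]
      simp only [pvA_row]
      rw [if_neg hcond, List.find?_cons_of_neg (by simp [hgood])]
      exact ih (c + 1) _ htail hx'

lemma pvA_row_eq_ref (cs : List Char) : pvA_row cs cs 0 false = pvRef cs := by
  rw [pvA_row_spec cs cs 0 false rfl (by simp), Nat.sub_zero, ← List.range_eq_range']
  rfl

-- the B-side: the staged passes compute the same first good index
lemma pvB_core (cs : List Char) (hs : List Nat)
    (hh : hs = (List.range cs.length).filter (fun i => cs[i]? == some '#')) :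
    (if hs.length < 2 then none
     else (List.range' (hs.headD 0 + 1) (hs.getLastD 0 - (hs.headD 0 + 1))).find?
            (fun c => cs[c]? == some '.'))
      = (List.range cs.length).find? (pvGood cs) := by
  have hmem : ∀ i, i ∈ hs ↔ i < cs.length ∧ cs[i]? = some '#' := by
    intro i
    rw [hh, List.mem_filter, List.mem_range]
    simp
  have hpw : hs.Pairwise (· < ·) := hh ▸ (List.pairwise_lt_range).filter _
  by_cases hlen : hs.length < 2
  · rw [if_pos hlen]
    symm
    apply List.find?_eq_none.mpr
    intro k hk
    simp only [Bool.not_eq_true]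
    apply Bool.eq_false_iff.mpr
    intro hgd
    rw [pv_good_iff] at hgd
    obtain ⟨-, ⟨i, hik, hi⟩, j, hjk, hj⟩ := hgd
    have hjn : j < cs.length := (List.getElem?_eq_some_iff.mp hj).1
    have hin : i < cs.length := (List.getElem?_eq_some_iff.mp hi).1
    have hi' : i ∈ hs := (hmem i).mpr ⟨hin, hi⟩
    have hj' : j ∈ hs := (hmem j).mpr ⟨hjn, hj⟩
    match hhs : hs, hi', hj', hlen with
    | [], hi', hj', hlen => simp at hi'
    | [x], hi', hj', hlen =>
      simp at hi' hj'
      omega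
    | x :: y :: t, hi', hj', hlen => simp at hlen
  · rw [if_neg hlen]
    obtain ⟨a, b, t, hhs⟩ : ∃ a b t, hs = a :: b :: t := by
      match hs, hlen with
      | [], h => exact (h (by simp)).elim
      | [x], h => exact (h (by simp)).elim
      | a :: b :: t, _ => exact ⟨a, b, t, rfl⟩
    rw [hhs] at hmem hpw ⊢
    simp only [List.headD_cons]
    set L := (a :: b :: t).getLastD 0 with hL
    have hLmem : L ∈ a :: b :: t := pv_getLastD_mem _ (by simp)
    have hFmin : ∀ x ∈ a :: b :: t, a ≤ x := by
      intro x hx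
      rcases List.mem_cons.mp hx with rfl | hx'
      · exact le_refl x
      · exact le_of_lt ((List.pairwise_cons.mp hpw).1 x hx')
    have hLmax : ∀ x ∈ a :: b :: t, x ≤ L := pv_le_getLastD _ hpw
    have hFhash : cs[a]? = some '#' := ((hmem a).mp (by simp)).2
    have hLhash : cs[L]? = some '#' := ((hmem L).mp hLmem).2
    have hLn : L < cs.length := ((hmem L).mp hLmem).1
    have hFL : a < L := by
      have hab : a < b := (List.pairwise_cons.mp hpw).1 b (by simp)
      have hbL : b ≤ L := hLmax b (by simp)
      omega
    have hgood_iff : ∀ k, pvGood cs k = true ↔ (a + 1 ≤ k ∧ k < L ∧ cs[k]? = some '.') := by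
      intro k
      rw [pv_good_iff]
      constructor
      · rintro ⟨hdot, ⟨i, hik, hi⟩, j, hjk, hj⟩
        have hin : i < cs.length := (List.getElem?_eq_some_iff.mp hi).1
        have hjn : j < cs.length := (List.getElem?_eq_some_iff.mp hj).1
        have hai : a ≤ i := hFmin i ((hmem i).mpr ⟨hin, hi⟩)
        have hjL : j ≤ L := hLmax j ((hmem j).mpr ⟨hjn, hj⟩)
        exact ⟨by omega, by omega, hdot⟩
      · rintro ⟨h1, h2, hdot⟩
        exact ⟨hdot, ⟨a, by omega, hFhash⟩, L, by omega, hLhash⟩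
    have hsplit : List.range cs.length =
        List.range' 0 (a + 1) ++ (List.range' (a + 1) (L - (a + 1)) ++ List.range' L (cs.length - L)) := by
      rw [List.range_eq_range']
      have e2 : List.range' (a + 1) (L - (a + 1)) ++ List.range' L (cs.length - L)
          = List.range' (a + 1) (cs.length - (a + 1)) := by
        have h := @List.range'_append (a + 1) (L - (a + 1)) (cs.length - L) 1
        simp only [one_mul] at h
        rw [show (a + 1) + (L - (a + 1)) = L by omega] at h
        rw [h]
        congr 1
        omega
      rw [e2]
      have h := @List.range'_append 0 (a + 1) (cs.length - (a + 1)) 1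
      simp only [one_mul, Nat.zero_add] at h
      rw [h]
      congr 1
      omega
    rw [hsplit, List.find?_append, List.find?_append]
    have h1 : (List.range' 0 (a + 1)).find? (pvGood cs) = none := by
      apply pv_find?_range'_none
      intro k hk1 hk2
      apply Bool.eq_false_iff.mpr
      intro hgd
      have := (hgood_iff k).mp hgd
      omega
    have h3 : (List.range' L (cs.length - L)).find? (pvGood cs) = none := by
      apply pv_find?_range'_none
      intro k hk1 hk2
      apply Bool.eq_false_iff.mpr
      intro hgd
      have := (hgood_iff k).mp hgd
      omega
    have h2 : (List.range' (a + 1) (L - (a + 1))).find? (fun c => cs[c]? == some '.')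
        = (List.range' (a + 1) (L - (a + 1))).find? (pvGood cs) := by
      apply pv_find?_congr
      intro x hx
      rw [List.mem_range'_1] at hx
      rw [Bool.eq_iff_iff]
      rw [hgood_iff x]
      simp only [beq_iff_eq]
      constructor
      · intro hd; exact ⟨by omega, by omega, hd⟩
      · rintro ⟨-, -, hd⟩; exact hd
    rw [h1, h3, h2]
    simp

lemma pvB_row_eq_ref (line : String) : pvB_row line = pvRef line.toList := by
  unfold pvB_row pvRef
  exact pvB_core line.toList _ rfl

lemma pv_rows_eq (l : List String) : ∀ (r : Int), pvA_rows r l = pvB_rows r l := by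
  induction l with
  | nil => intro r; rfl
  | cons s t ih =>
    intro r
    have hrow : pvB_row s = pvA_row s.toList s.toList 0 false := by
      rw [pvB_row_eq_ref, pvA_row_eq_ref]
    cases hA : pvA_row s.toList s.toList 0 false with
    | none => simp [pvA_rows, pvB_rows, hrow, hA, ih (r + 1)]
    | some c => simp [pvA_rows, pvB_rows, hrow, hA]

-- ===== VERDICT (by name: the statement is the Claim_ definition above) =====
theorem find_interior_point_spec : Claim_equal_find_interior_point := by
  intro mp _
  unfold Spec_find_interior_point find_interior_point find_interior_point_alt
  exact pv_rows_eq mp 0
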